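-- pv_equiv track=rewrite | github.com/victorlee079/leetcode | codility/aesthetictree.py | solution
-- ===== SOURCE A (Python) =====
-- def solution(A):
--     n = len(A)
--     dpu = [0] * (n+1)
--     dpd = [0] * (n+1)
--     cnt = 0
--     for i in range(1, n):
--         if A[i] >= A[i - 1]:
--             dpu[i] = dpu[i - 1] + 1
--     for i in range(1, n):
--         if A[i] <= A[i - 1]:
--             dpd[i] = dpd[i - 1] + 1
--
--     prevu, prevd = dpu[0], dpd[0]
--
--     # Special Case for all equal
--     if dpu == dpd:
--         return n // 2
--
--     for i in range(1, n+1):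
--         a = b = 0
--         if dpu[i] < prevu and prevu > prevd:
--             a = prevu // 2
--         if dpd[i] < prevd and prevd > prevu:
--             b = prevd // 2
--         prevu, prevd = dpu[i], dpd[i]
--         cnt += max(a, b)
--     return cnt
-- ===== SOURCE B (Python) =====
-- def solution(A):
--     n = len(A)
--     if all(x == y for x, y in zip(A, A[1:])):
--         return n // 2
--     cnt = up = down = 0
--     for x, y in zip(A, A[1:]):
--         if y < x:
--             if up > down:
--                 cnt += up // 2
--             up, down = 0, down + 1
--         elif y > x:
--             if down > up:
--                 cnt += down // 2
--             up, down = up + 1, 0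
--         else:
--             up, down = up + 1, down + 1
--     if up > down:
--         cnt += up // 2
--     elif down > up:
--         cnt += down // 2
--     return cnt
-- ===== Notes on version B (the rewrite author's own statement) =====
-- stated objective: simpler
-- what changed: Replaced the two length-(n+1) DP arrays and three index passes by a single left-to-right pass over adjacent pairs that keeps two scalar run-length counters (up/down) and flushes a run's contribution when it ends, with a trivial all-equal check up front; O(1) extra space instead of O(n).
import Mathlib
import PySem

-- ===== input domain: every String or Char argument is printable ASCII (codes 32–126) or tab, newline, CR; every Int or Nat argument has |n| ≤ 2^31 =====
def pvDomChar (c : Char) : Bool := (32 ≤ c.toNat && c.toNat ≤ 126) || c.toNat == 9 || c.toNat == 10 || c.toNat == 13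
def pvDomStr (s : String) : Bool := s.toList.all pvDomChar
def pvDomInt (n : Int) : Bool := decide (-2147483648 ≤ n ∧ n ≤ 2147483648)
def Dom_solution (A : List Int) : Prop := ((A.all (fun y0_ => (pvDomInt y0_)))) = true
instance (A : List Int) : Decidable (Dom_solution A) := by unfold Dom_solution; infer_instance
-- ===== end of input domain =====

-- B replaces A's two DP arrays and three index passes by one pass over adjacent pairs with two
-- scalar run counters (simpler, O(1) extra space); return values are proved identical.

-- ===== PORT A =====
-- Port notes: range(1, n) / range(1, n+1) are ported as List.range' 1 (n-1) / List.range' 1 n, and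
-- list indexing as Nat-indexed getD; every index A's loops use is nonnegative and in range, so this
-- is exact (no IndexError is reachable).  n // 2 and prevu // 2 use PySem.Int.floordiv.
def dpStep (c : Nat → Bool) (dp : List Int) (i : Nat) : List Int :=
  if c i then dp.set i (dp.getD (i-1) 0 + 1) else dp

def stepA (dpu dpd : List Int) (st : Int × Int × Int) (i : Nat) : Int × Int × Int :=
  let a := if dpu.getD i 0 < st.1 ∧ st.1 > st.2.1 then PySem.Int.floordiv st.1 2 else 0
  let b := if dpd.getD i 0 < st.2.1 ∧ st.2.1 > st.1 then PySem.Int.floordiv st.2.1 2 else 0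
  (dpu.getD i 0, dpd.getD i 0, st.2.2 + max a b)

def solution (A : List Int) : Int :=
  let n := A.length
  let dpu := (List.range' 1 (n-1)).foldl
    (dpStep (fun i => decide (A.getD i 0 ≥ A.getD (i-1) 0))) (List.replicate (n+1) 0)
  let dpd := (List.range' 1 (n-1)).foldl
    (dpStep (fun i => decide (A.getD i 0 ≤ A.getD (i-1) 0))) (List.replicate (n+1) 0)
  if dpu = dpd then PySem.Int.floordiv (n : Int) 2
  else ((List.range' 1 n).foldl (stepA dpu dpd) (dpu.getD 0 0, dpd.getD 0 0, 0)).2.2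

-- ===== PORT B =====
-- Port notes: zip(A, A[1:]) is ported as A.zip A.tail (exact: A[1:] = tail); state is (cnt, up, down).
def stepB (st : Int × Int × Int) (p : Int × Int) : Int × Int × Int :=
  if p.2 < p.1 then
    (if st.2.1 > st.2.2 then st.1 + PySem.Int.floordiv st.2.1 2 else st.1, 0, st.2.2 + 1)
  else if p.2 > p.1 then
    (if st.2.2 > st.2.1 then st.1 + PySem.Int.floordiv st.2.2 2 else st.1, st.2.1 + 1, 0)
  else (st.1, st.2.1 + 1, st.2.2 + 1)

def solution_alt (A : List Int) : Int :=
  let n := A.length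
  if (A.zip A.tail).all (fun p => p.1 == p.2) then PySem.Int.floordiv (n : Int) 2
  else
    let st := (A.zip A.tail).foldl stepB (0, 0, 0)
    if st.2.1 > st.2.2 then st.1 + PySem.Int.floordiv st.2.1 2
    else if st.2.2 > st.2.1 then st.1 + PySem.Int.floordiv st.2.2 2
    else st.1

-- ===== PRECONDITION & SPEC =====
def Spec_solution (A : List Int) (out : Int) : Prop := out = solution_alt A
instance (A : List Int) (out : Int) : Decidable (Spec_solution A out) := by unfold Spec_solution; infer_instance

-- ===== CLAIM (what is proved, stated in full; the proofs are below) =====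
def Claim_equal_solution : Prop := ∀ (A : List Int), Dom_solution A → Spec_solution A (solution A)

-- ===== LEMMAS AND PROOFS =====

-- run length of the Bool condition c, i.e. the value dpu[i] / dpd[i] ends up with
def runLen (c : Nat → Bool) : Nat → Int
  | 0 => 0
  | i+1 => if c (i+1) then runLen c i + 1 else 0

def cu (A : List Int) : Nat → Bool :=
  fun i => decide (i < A.length) && decide (A.getD i 0 ≥ A.getD (i-1) 0)

def cd (A : List Int) : Nat → Bool :=
  fun i => decide (i < A.length) && decide (A.getD i 0 ≤ A.getD (i-1) 0)

-- all adjacent elements equal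
def Const (A : List Int) : Prop := ∀ i : Nat, i + 1 < A.length → A.getD (i+1) 0 = A.getD i 0

lemma runLen_nonneg (c : Nat → Bool) (i : Nat) : 0 ≤ runLen c i := by
  induction i with
  | zero => simp [runLen]
  | succ i ih => simp only [runLen]; split <;> omega

lemma floordiv_two_nonneg {x : Int} (h : 0 ≤ x) : 0 ≤ PySem.Int.floordiv x 2 := by
  rw [PySem.Int.floordiv_eq_ediv_of_pos (by omega)]
  exact Int.ediv_nonneg h (by omega)

-- the dp array built by A's first/second loop, as a pointwise function
lemma fold_dp (n : Nat) (c' : Nat → Bool) (k : Nat) (hk : k ≤ n - 1) :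
    (List.range' 1 k).foldl (dpStep c') (List.replicate (n+1) 0)
      = (List.range (n+1)).map
          (fun j => if j ≤ k then runLen (fun i => decide (i < n) && c' i) j else 0) := by
  induction k with
  | zero =>
    refine List.ext_getElem (by simp) ?_
    intro i h1 h2
    simp only [List.range'_zero, List.foldl_nil, List.getElem_replicate,
      List.getElem_map, List.getElem_range]
    split
    · next h => interval_cases i; simp [runLen]
    · rfl
  | succ k ih =>
    have hk' : k ≤ n - 1 := by omega
    have hkn : k + 1 < n := by omega
    rw [List.range'_concat, List.foldl_append, ih hk']
    simp only [List.foldl_cons, List.foldl_nil]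
    have hidx : 1 + 1 * k = k + 1 := by omega
    rw [hidx]
    unfold dpStep
    have hget : ((List.range (n+1)).map
        (fun j => if j ≤ k then runLen (fun i => decide (i < n) && c' i) j else 0)).getD ((k+1)-1) 0
        = runLen (fun i => decide (i < n) && c' i) k := by
      rw [show (k+1)-1 = k from rfl,
        PySem.List.getD_map_range _ _ _ _ (by omega)]
      simp
    by_cases hc : c' (k+1) = true
    · rw [if_pos hc, hget]
      refine List.ext_getElem (by simp) ?_
      intro j h1 h2
      simp only [List.getElem_set, List.getElem_map, List.getElem_range]
      by_cases hj : k + 1 = j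
      · subst hj
        rw [if_pos rfl, if_pos (le_refl _)]
        simp [runLen, hkn, hc]
      · rw [if_neg hj]
        by_cases hjk : j ≤ k
        · rw [if_pos hjk, if_pos (by omega)]
        · rw [if_neg hjk, if_neg (by omega)]
    · rw [if_neg hc]
      refine List.ext_getElem (by simp) ?_
      intro j h1 h2
      simp only [List.getElem_map, List.getElem_range]
      by_cases hj : j = k + 1
      · subst hj
        rw [if_neg (by omega), if_pos (le_refl _)]
        simp [runLen, hc]
      · by_cases hjk : j ≤ k
        · rw [if_pos hjk, if_pos (by omega)]
        · rw [if_neg hjk, if_neg (by omega)]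

-- unfolding lemmas for the run-length functions
lemma runLen_u_succ (A : List Int) (i : Nat) (h : i + 1 < A.length) :
    runLen (cu A) (i+1)
      = if A.getD i 0 ≤ A.getD (i+1) 0 then runLen (cu A) i + 1 else 0 := by
  simp only [runLen]
  rw [show cu A (i+1) = decide (A.getD i 0 ≤ A.getD (i+1) 0) from by
    simp [cu, h]]
  simp only [decide_eq_true_eq]

lemma runLen_d_succ (A : List Int) (i : Nat) (h : i + 1 < A.length) :
    runLen (cd A) (i+1)
      = if A.getD (i+1) 0 ≤ A.getD i 0 then runLen (cd A) i + 1 else 0 := by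
  simp only [runLen]
  rw [show cd A (i+1) = decide (A.getD (i+1) 0 ≤ A.getD i 0) from by
    simp [cd, h]]
  simp only [decide_eq_true_eq]

lemma runLen_u_stop (A : List Int) (i : Nat) (h : ¬ i + 1 < A.length) :
    runLen (cu A) (i+1) = 0 := by
  simp only [runLen]
  rw [if_neg (show ¬ (cu A (i+1) = true) from by simp [cu, h])]

lemma runLen_d_stop (A : List Int) (i : Nat) (h : ¬ i + 1 < A.length) :
    runLen (cd A) (i+1) = 0 := by
  simp only [runLen]
  rw [if_neg (show ¬ (cd A (i+1) = true) from by simp [cd, h])]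

lemma runLen_u_len (A : List Int) : runLen (cu A) A.length = 0 := by
  cases hA : A.length with
  | zero => rfl
  | succ m => exact runLen_u_stop A m (by omega)

lemma runLen_d_len (A : List Int) : runLen (cd A) A.length = 0 := by
  cases hA : A.length with
  | zero => rfl
  | succ m => exact runLen_d_stop A m (by omega)

lemma dpu_eq (A : List Int) :
    (List.range' 1 (A.length-1)).foldl
        (dpStep (fun i => decide (A.getD i 0 ≥ A.getD (i-1) 0))) (List.replicate (A.length+1) 0)
      = (List.range (A.length+1)).map (runLen (cu A)) := by
  rw [fold_dp A.length _ (A.length - 1) (le_refl _)]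
  refine List.map_congr_left ?_
  intro j hj
  rw [List.mem_range] at hj
  by_cases h : j ≤ A.length - 1
  · rw [if_pos h]; rfl
  · have hj' : j = A.length := by omega
    subst hj'
    rw [if_neg h, runLen_u_len A]

lemma dpd_eq (A : List Int) :
    (List.range' 1 (A.length-1)).foldl
        (dpStep (fun i => decide (A.getD i 0 ≤ A.getD (i-1) 0))) (List.replicate (A.length+1) 0)
      = (List.range (A.length+1)).map (runLen (cd A)) := by
  rw [fold_dp A.length _ (A.length - 1) (le_refl _)]
  refine List.map_congr_left ?_
  intro j hj
  rw [List.mem_range] at hj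
  by_cases h : j ≤ A.length - 1
  · rw [if_pos h]; rfl
  · have hj' : j = A.length := by omega
    subst hj'
    rw [if_neg h, runLen_d_len A]

-- zip(A, A[1:]) as an indexed map
lemma zip_eq (A : List Int) :
    A.zip A.tail = (List.range (A.length - 1)).map (fun j => (A.getD j 0, A.getD (j+1) 0)) := by
  refine List.ext_getElem
    (by simp only [List.length_zip, List.length_tail, List.length_map, List.length_range]; omega) ?_
  intro i h1 h2
  simp only [List.length_zip, List.length_tail] at h1
  have hi : i + 1 < A.length := by omega
  simp only [List.getElem_zip, List.getElem_tail, List.getElem_map, List.getElem_range]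
  rw [List.getD_eq_getElem _ _ (by omega), List.getD_eq_getElem _ _ hi]

lemma allEq_iff (A : List Int) :
    ((A.zip A.tail).all (fun p => p.1 == p.2) = true) ↔ Const A := by
  rw [zip_eq, List.all_eq_true]
  constructor
  · intro h i hi
    have := h (A.getD i 0, A.getD (i+1) 0)
      (List.mem_map.mpr ⟨i, List.mem_range.mpr (by omega), rfl⟩)
    have h2 : A.getD i 0 = A.getD (i+1) 0 := by simpa using this
    exact h2.symm
  · intro h p hp
    rcases List.mem_map.mp hp with ⟨j, hj, rfl⟩
    rw [List.mem_range] at hj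
    simpa using (h j (by omega)).symm

lemma const_runLen (A : List Int) (hC : Const A) :
    ∀ i : Nat, runLen (cu A) i = runLen (cd A) i := by
  intro i
  induction i with
  | zero => rfl
  | succ i ih =>
    by_cases hin : i + 1 < A.length
    · have he := hC i hin
      rw [runLen_u_succ A i hin, runLen_d_succ A i hin, ih,
        if_pos (by omega), if_pos (by omega)]
    · rw [runLen_u_stop A i hin, runLen_d_stop A i hin]

lemma runLen_const (A : List Int)
    (h : ∀ i : Nat, i < A.length + 1 → runLen (cu A) i = runLen (cd A) i) : Const A := by
  intro i hi
  have hu0 := runLen_nonneg (cu A) i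
  have hd0 := runLen_nonneg (cd A) i
  have he : runLen (cu A) (i+1) = runLen (cd A) (i+1) := h (i+1) (by omega)
  rcases lt_trichotomy (A.getD (i+1) 0) (A.getD i 0) with hlt | heq | hgt
  · exfalso
    rw [runLen_u_succ A i hi, runLen_d_succ A i hi,
      if_neg (by omega), if_pos (by omega)] at he
    omega
  · exact heq
  · exfalso
    rw [runLen_u_succ A i hi, runLen_d_succ A i hi,
      if_pos (by omega), if_neg (by omega)] at he
    omega

-- the simulation between A's third loop and B's single pass
lemma sim (A : List Int) (m : Nat) : ∀ (i : Nat) (c : Int), i + m < A.length →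
    (List.range' (i+1) m).foldl
        (stepA ((List.range (A.length+1)).map (runLen (cu A)))
               ((List.range (A.length+1)).map (runLen (cd A))))
        (runLen (cu A) i, runLen (cd A) i, c)
      = (runLen (cu A) (i+m), runLen (cd A) (i+m),
         (((List.range' i m).map (fun j => (A.getD j 0, A.getD (j+1) 0))).foldl stepB
            (c, runLen (cu A) i, runLen (cd A) i)).1)
    ∧ (((List.range' i m).map (fun j => (A.getD j 0, A.getD (j+1) 0))).foldl stepB
          (c, runLen (cu A) i, runLen (cd A) i)).2
        = (runLen (cu A) (i+m), runLen (cd A) (i+m)) := by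
  induction m with
  | zero => intro i c h; simp
  | succ m ih =>
    intro i c h
    have hlen : i + 1 < A.length := by omega
    have hgu : ((List.range (A.length+1)).map (runLen (cu A))).getD (i+1) 0
        = runLen (cu A) (i+1) := PySem.List.getD_map_range _ _ _ _ (by omega)
    have hgd : ((List.range (A.length+1)).map (runLen (cd A))).getD (i+1) 0
        = runLen (cd A) (i+1) := PySem.List.getD_map_range _ _ _ _ (by omega)
    have hu0 := runLen_nonneg (cu A) i
    have hd0 := runLen_nonneg (cd A) i
    rw [List.range'_succ, List.range'_succ]
    simp only [List.map_cons, List.foldl_cons]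
    have key : ∃ c' : Int,
        stepA ((List.range (A.length+1)).map (runLen (cu A)))
              ((List.range (A.length+1)).map (runLen (cd A)))
              (runLen (cu A) i, runLen (cd A) i, c) (i+1)
          = (runLen (cu A) (i+1), runLen (cd A) (i+1), c')
        ∧ stepB (c, runLen (cu A) i, runLen (cd A) i) (A.getD i 0, A.getD (i+1) 0)
          = (c', runLen (cu A) (i+1), runLen (cd A) (i+1)) := by
      rcases lt_trichotomy (A.getD (i+1) 0) (A.getD i 0) with hlt | heq | hgt
      · -- strictly decreasing step: the up-run ends
        have hru : runLen (cu A) (i+1) = 0 := by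
          rw [runLen_u_succ A i hlen, if_neg (by omega)]
        have hrd : runLen (cd A) (i+1) = runLen (cd A) i + 1 := by
          rw [runLen_d_succ A i hlen, if_pos (by omega)]
        refine ⟨if runLen (cu A) i > runLen (cd A) i
                  then c + PySem.Int.floordiv (runLen (cu A) i) 2 else c, ?_, ?_⟩
        · simp only [stepA, hgu, hgd, hru, hrd]
          by_cases hud : runLen (cu A) i > runLen (cd A) i
          · rw [if_pos ⟨by omega, hud⟩, if_neg (by omega), if_pos hud,
              max_eq_left (floordiv_two_nonneg hu0)]
          · rw [if_neg (by omega), if_neg (by omega), if_neg hud]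
            simp
        · simp only [stepB]
          rw [if_pos hlt, hru, hrd]
      · -- equal step: both runs continue
        have hru : runLen (cu A) (i+1) = runLen (cu A) i + 1 := by
          rw [runLen_u_succ A i hlen, if_pos (by omega)]
        have hrd : runLen (cd A) (i+1) = runLen (cd A) i + 1 := by
          rw [runLen_d_succ A i hlen, if_pos (by omega)]
        refine ⟨c, ?_, ?_⟩
        · simp only [stepA, hgu, hgd, hru, hrd]
          rw [if_neg (by omega), if_neg (by omega)]
          simp
        · simp only [stepB]
          rw [if_neg (by omega), if_neg (by omega), hru, hrd]
      · -- strictly increasing step: the down-run ends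
        have hru : runLen (cu A) (i+1) = runLen (cu A) i + 1 := by
          rw [runLen_u_succ A i hlen, if_pos (by omega)]
        have hrd : runLen (cd A) (i+1) = 0 := by
          rw [runLen_d_succ A i hlen, if_neg (by omega)]
        refine ⟨if runLen (cd A) i > runLen (cu A) i
                  then c + PySem.Int.floordiv (runLen (cd A) i) 2 else c, ?_, ?_⟩
        · simp only [stepA, hgu, hgd, hru, hrd]
          by_cases hdu : runLen (cd A) i > runLen (cu A) i
          · rw [if_neg (by omega), if_pos ⟨by omega, hdu⟩, if_pos hdu,
              max_eq_right (floordiv_two_nonneg hd0)]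
          · rw [if_neg (by omega), if_neg (by omega), if_neg hdu]
            simp
        · simp only [stepB]
          rw [if_neg (by omega), if_pos hgt, hru, hrd]
    rcases key with ⟨c', hA1, hB1⟩
    rw [hA1, hB1]
    have := ih (i+1) c' (by omega)
    rw [show i + 1 + m = i + (m+1) from by omega] at this
    exact this

-- ===== VERDICT (by name: the statement is the Claim_ definition above) =====
theorem solution_spec : Claim_equal_solution := by
  intro A _dom
  unfold Spec_solution solution solution_alt
  simp only [dpu_eq, dpd_eq]
  by_cases hC : Const A
  · have hmapeq : (List.range (A.length+1)).map (runLen (cu A))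
        = (List.range (A.length+1)).map (runLen (cd A)) :=
      List.map_inj_left.mpr (fun j _ => const_runLen A hC j)
    rw [if_pos hmapeq, if_pos ((allEq_iff A).mpr hC)]
  · have hne : ¬ ((List.range (A.length+1)).map (runLen (cu A))
        = (List.range (A.length+1)).map (runLen (cd A))) := by
      intro h
      exact hC (runLen_const A (fun i hi =>
        List.map_inj_left.mp h i (List.mem_range.mpr hi)))
    rw [if_neg hne, if_neg (fun h => hC ((allEq_iff A).mp h))]
    have hn2 : 2 ≤ A.length := by
      by_contra hn
      exact hC (fun i hi => by omega)
    have hg0u : ((List.range (A.length+1)).map (runLen (cu A))).getD 0 0 = (0:Int) := by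
      rw [PySem.List.getD_map_range _ _ _ _ (by omega)]
      simp [runLen]
    have hg0d : ((List.range (A.length+1)).map (runLen (cd A))).getD 0 0 = (0:Int) := by
      rw [PySem.List.getD_map_range _ _ _ _ (by omega)]
      simp [runLen]
    rw [hg0u, hg0d]
    -- split A's third loop into the body [1, n) and the sentinel iteration i = n
    have hsplit : List.range' 1 A.length = List.range' 1 (A.length - 1) ++ [A.length] := by
      have h1 : A.length = (A.length - 1) + 1 := by omega
      rw [h1, List.range'_concat]
      simp
      omega
    rw [hsplit, List.foldl_append]
    have hsim := sim A (A.length - 1) 0 0 (by omega)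
    simp only [Nat.zero_add] at hsim
    rw [show runLen (cu A) 0 = (0:Int) from by simp [runLen],
      show runLen (cd A) 0 = (0:Int) from by simp [runLen]] at hsim
    rw [← List.range_eq_range'] at hsim
    rw [zip_eq A]
    rw [hsim.1]
    set r := ((List.range (A.length - 1)).map
        (fun j => (A.getD j 0, A.getD (j+1) 0))).foldl stepB ((0:Int), (0:Int), (0:Int)) with hr
    have hr2 : r.2 = (runLen (cu A) (A.length - 1), runLen (cd A) (A.length - 1)) := hsim.2
    -- the sentinel iteration i = n reads dpu[n] = dpd[n] = 0 and flushes the final runs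
    have hgnu : ((List.range (A.length+1)).map (runLen (cu A))).getD A.length 0 = (0:Int) := by
      rw [PySem.List.getD_map_range _ _ _ _ (by omega), runLen_u_len A]
    have hgnd : ((List.range (A.length+1)).map (runLen (cd A))).getD A.length 0 = (0:Int) := by
      rw [PySem.List.getD_map_range _ _ _ _ (by omega), runLen_d_len A]
    simp only [List.foldl_cons, List.foldl_nil, stepA, hgnu, hgnd, hr2]
    have hu0 := runLen_nonneg (cu A) (A.length - 1)
    have hd0 := runLen_nonneg (cd A) (A.length - 1)
    by_cases hud : runLen (cu A) (A.length - 1) > runLen (cd A) (A.length - 1)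
    · rw [if_pos ⟨by omega, hud⟩, if_neg (by omega), if_pos hud,
        max_eq_left (floordiv_two_nonneg hu0)]
    · by_cases hdu : runLen (cd A) (A.length - 1) > runLen (cu A) (A.length - 1)
      · rw [if_neg (by omega), if_pos ⟨by omega, hdu⟩, if_neg hud, if_pos hdu,
          max_eq_right (floordiv_two_nonneg hd0)]
      · rw [if_neg (by omega), if_neg (by omega), if_neg hud, if_neg hdu]
        simp
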